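-- pv_equiv track=rewrite | github.com/tamar-levi/DanceSchoolManagment | utils/payment_utils.py | check_if_same_day_multiple_groups
-- ===== SOURCE A (Python) =====
-- def check_if_same_day_multiple_groups(groups_with_dates):
--     """Check if student joined multiple groups on the same day"""
--     if len(groups_with_dates) <= 1:
--         return False
--
--     date_groups = {}
--     for group_info in groups_with_dates:
--         join_date = group_info["join_date"]
--         if join_date not in date_groups:
--             date_groups[join_date] = []
--         date_groups[join_date].append(group_info)
--
--     for date, groups in date_groups.items():
--         if len(groups) > 1:
--             return True
--
--     return False
-- ===== SOURCE B (Python) =====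
-- def check_if_same_day_multiple_groups(groups_with_dates):
--     """Check if student joined multiple groups on the same day"""
--     dates = [group_info["join_date"] for group_info in groups_with_dates]
--     return len(set(dates)) != len(dates)
-- ===== Notes on version B (the rewrite author's own statement) =====
-- stated objective: simpler
-- what changed: Replaces A's dict-of-lists grouping plus a second scan over the buckets with a single uniqueness-by-cardinality test (len(set(dates)) != len(dates)); the len<=1 guard disappears because short date lists trivially have no duplicates.
-- outside the precondition, e.g. on check_if_same_day_multiple_groups([{'name': 'x'}]): A returns False, B raises KeyError
import Mathlib
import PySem

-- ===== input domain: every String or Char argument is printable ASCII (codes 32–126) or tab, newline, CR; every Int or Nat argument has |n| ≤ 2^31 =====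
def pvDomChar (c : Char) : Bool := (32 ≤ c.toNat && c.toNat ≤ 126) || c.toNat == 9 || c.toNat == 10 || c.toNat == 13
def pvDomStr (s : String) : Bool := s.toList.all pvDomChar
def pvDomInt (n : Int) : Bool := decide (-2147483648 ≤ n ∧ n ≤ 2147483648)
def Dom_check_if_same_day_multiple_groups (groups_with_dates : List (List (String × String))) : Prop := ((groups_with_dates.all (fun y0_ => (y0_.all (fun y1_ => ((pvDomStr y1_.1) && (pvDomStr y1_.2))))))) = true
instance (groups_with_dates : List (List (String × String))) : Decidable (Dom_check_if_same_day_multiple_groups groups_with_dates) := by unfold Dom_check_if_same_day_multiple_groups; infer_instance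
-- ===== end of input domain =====

-- B replaces A's dict-of-lists grouping + bucket scan by a uniqueness-by-cardinality test on the
-- list of join dates (simpler, same O(n) cost); equivalence is about the return value only.

-- gi["join_date"]: shared key lookup of both Pythons; the .getD "" default is never reached inside Pre_
def pvJoinDate (group_info : List (String × String)) : String :=
  ((PySem.Dict.mk group_info).get? "join_date").getD ""

-- ===== PORT A =====
def check_if_same_day_multiple_groups (groups_with_dates : List (List (String × String))) : Bool :=
  if groups_with_dates.length ≤ 1 then false
  else
    let date_groups := groups_with_dates.foldl
      (fun (d : PySem.Dict String (List (List (String × String)))) group_info =>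
        d.modify (pvJoinDate group_info) [] (fun v => v ++ [group_info]))
      PySem.Dict.empty
    -- 'for date, groups in date_groups.items(): if len(groups) > 1: return True' / 'return False'
    date_groups.items.any (fun p => decide (1 < p.2.length))

-- ===== PORT B =====
def check_if_same_day_multiple_groups_alt (groups_with_dates : List (List (String × String))) : Bool :=
  let dates := groups_with_dates.map pvJoinDate
  decide ((PySem.Set.ofList dates).length ≠ dates.length)

-- ===== PRECONDITION & SPEC =====
-- Pre_ excludes inputs where some group lacks the "join_date" key: A raises KeyError there when
-- there are ≥ 2 groups, and on ≤ 1 groups A's early guard returns False while B's comprehension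
-- still raises KeyError — B does the natural thing (raise) on malformed groups.
def Pre_check_if_same_day_multiple_groups (groups_with_dates : List (List (String × String))) : Prop :=
  ∀ group_info ∈ groups_with_dates, (PySem.Dict.mk group_info).contains "join_date" = true
instance (groups_with_dates : List (List (String × String))) : Decidable (Pre_check_if_same_day_multiple_groups groups_with_dates) := by unfold Pre_check_if_same_day_multiple_groups; infer_instance
def pvWitness_check_if_same_day_multiple_groups : (List (List (String × String))) :=
  [[("join_date", "2024-01-01"), ("name", "salsa")], [("join_date", "2024-01-01")]]

def Spec_check_if_same_day_multiple_groups (groups_with_dates : List (List (String × String))) (out : Bool) : Prop := out = check_if_same_day_multiple_groups_alt groups_with_dates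
instance (groups_with_dates : List (List (String × String))) (out : Bool) : Decidable (Spec_check_if_same_day_multiple_groups groups_with_dates out) := by unfold Spec_check_if_same_day_multiple_groups; infer_instance

-- ===== CLAIM (what is proved, stated in full; the proofs are below) =====
def Claim_equal_check_if_same_day_multiple_groups : Prop := ∀ (groups_with_dates : List (List (String × String))), Dom_check_if_same_day_multiple_groups groups_with_dates → Pre_check_if_same_day_multiple_groups groups_with_dates → Spec_check_if_same_day_multiple_groups groups_with_dates (check_if_same_day_multiple_groups groups_with_dates)

-- ===== LEMMAS AND PROOFS =====

-- A's grouping fold (name used only by the proofs)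
def pvFoldA (groups_with_dates : List (List (String × String))) :
    PySem.Dict String (List (List (String × String))) :=
  groups_with_dates.foldl
    (fun d group_info => d.modify (pvJoinDate group_info) [] (fun v => v ++ [group_info]))
    PySem.Dict.empty

-- keys of A's dict = the distinct join dates, in first-occurrence order
theorem pvKeys_foldA_aux (gs : List (List (String × String)))
    (d : PySem.Dict String (List (List (String × String)))) :
    (gs.foldl (fun d group_info => d.modify (pvJoinDate group_info) [] (fun v => v ++ [group_info])) d).keys
      = PySem.Set.update d.keys (gs.map pvJoinDate) := by
  induction gs generalizing d with
  | nil => rfl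
  | cons gi rest ih =>
    simp only [List.foldl_cons, List.map_cons]
    rw [ih]
    have hstep : (d.modify (pvJoinDate gi) [] (fun v => v ++ [gi])).keys
        = PySem.Set.add d.keys (pvJoinDate gi) := by
      rw [PySem.Dict.keys_modify]
      by_cases hc : d.contains (pvJoinDate gi) = true
      · rw [PySem.Dict.keys_insert_of_contains _ _ hc]
        have hmem : pvJoinDate gi ∈ d.keys :=
          (PySem.Dict.contains_iff_mem_keys d (pvJoinDate gi)).mp hc
        simp [PySem.Set.add, hmem]
      · have hc' : d.contains (pvJoinDate gi) = false := by
          cases h : d.contains (pvJoinDate gi) <;> simp_all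
        rw [PySem.Dict.keys_insert_of_not_contains _ _ hc']
        have hmem : pvJoinDate gi ∉ d.keys := fun hm =>
          by simp [(PySem.Dict.contains_iff_mem_keys d (pvJoinDate gi)).mpr hm] at hc'
        simp [PySem.Set.add, hmem]
    rw [hstep]
    rfl

theorem pvKeys_foldA (gs : List (List (String × String))) :
    (pvFoldA gs).keys = PySem.Set.ofList (gs.map pvJoinDate) := by
  unfold pvFoldA
  rw [pvKeys_foldA_aux]
  exact PySem.Set.update_nil_left _

-- the bucket of date c has exactly count-of-c many members
theorem pvGetD_foldA (gs : List (List (String × String))) (c : String) :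
    ((pvFoldA gs).getD c []).length = (gs.map pvJoinDate).count c := by
  unfold pvFoldA
  have hmap : gs.foldl
      (fun d group_info => d.modify (pvJoinDate group_info) [] (fun v => v ++ [group_info]))
      PySem.Dict.empty
      = (gs.map (fun gi => (pvJoinDate gi, gi))).foldl
          (fun d p => d.modify p.1 [] (fun v => v ++ [p.2])) PySem.Dict.empty := by
    rw [List.foldl_map]
  rw [hmap, PySem.Dict.getD_foldl_modify_append]
  simp [List.count_eq_countP, ← List.countP_eq_length_filter, List.countP_map, Function.comp_def]

-- fold-with-add produces a sublist (used for: equal lengths force Nodup)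
theorem pvFoldAdd_sublist (xs : List String) :
    ∀ (s ys : List String), s.Sublist ys → (xs.foldl PySem.Set.add s).Sublist (ys ++ xs) := by
  induction xs with
  | nil => intro s ys h; simpa using h
  | cons x rest ih =>
    intro s ys h
    simp only [List.foldl_cons]
    have hadd : (PySem.Set.add s x).Sublist (ys ++ [x]) := by
      unfold PySem.Set.add
      split
      · exact h.trans (List.sublist_append_left ys [x])
      · exact List.Sublist.append h (List.Sublist.refl [x])
    have := ih (PySem.Set.add s x) (ys ++ [x]) hadd
    simpa [List.append_assoc] using this

theorem pvOfList_sublist (xs : List String) : (PySem.Set.ofList xs).Sublist xs := by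
  have h := pvFoldAdd_sublist xs [] [] (List.Sublist.refl [])
  simpa [PySem.Set.ofList_eq_foldl] using h

-- the heart: "some date occurs twice" = "distinct count differs from total count"
theorem pvAny_count_eq_card (ds : List String) :
    (PySem.Set.ofList ds).any (fun c => decide (1 < ds.count c))
      = decide ((PySem.Set.ofList ds).length ≠ ds.length) := by
  by_cases hn : ds.Nodup
  · have hself : PySem.Set.ofList ds = ds := PySem.Set.ofList_eq_self_of_nodup ds hn
    have hcnt := List.nodup_iff_count_le_one.mp hn
    rw [hself]
    simp only [ne_eq, not_true_eq_false, decide_false]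
    rw [List.any_eq_false]
    intro c _
    simpa using Nat.not_lt.mpr (hcnt c)
  · have hne : (PySem.Set.ofList ds).length ≠ ds.length := by
      intro hlen
      have heq : PySem.Set.ofList ds = ds := (pvOfList_sublist ds).eq_of_length hlen
      exact hn (heq ▸ PySem.Set.nodup_ofList ds)
    obtain ⟨c, hc⟩ : ∃ c, 1 < ds.count c := by
      by_contra hall
      simp only [not_exists, not_lt] at hall
      exact hn (List.nodup_iff_count_le_one.mpr hall)
    have hmem : c ∈ PySem.Set.ofList ds :=
      (PySem.Set.mem_ofList ds c).mpr (List.count_pos_iff.mp (Nat.lt_of_lt_of_le Nat.zero_lt_one (Nat.le_of_lt hc)))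
    have hany : (PySem.Set.ofList ds).any (fun c => decide (1 < ds.count c)) = true :=
      List.any_eq_true.mpr ⟨c, hmem, by simp [hc]⟩
    rw [hany]
    simp [hne]

-- main proof
theorem check_if_same_day_multiple_groups_spec : Claim_equal_check_if_same_day_multiple_groups := by
  intro gs _ _
  unfold Spec_check_if_same_day_multiple_groups check_if_same_day_multiple_groups
    check_if_same_day_multiple_groups_alt
  by_cases hlen : gs.length ≤ 1
  · rw [if_pos hlen]
    have hnd : (gs.map pvJoinDate).Nodup := by
      match gs, hlen with
      | [], _ => simp
      | [g], _ => simp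
    simp [PySem.Set.ofList_eq_self_of_nodup _ hnd]
  · rw [if_neg hlen]
    show (pvFoldA gs).items.any (fun p => decide (1 < p.2.length)) = _
    have hkeysnd : (pvFoldA gs).keys.Nodup := by
      rw [pvKeys_foldA]; exact PySem.Set.nodup_ofList _
    have hitems : (pvFoldA gs).items.any (fun p => decide (1 < p.2.length))
        = (pvFoldA gs).keys.any (fun k => decide (1 < ((pvFoldA gs).getD k []).length)) := by
      show _ = ((pvFoldA gs).items.map Prod.fst).any _
      rw [List.any_map]
      apply PySem.List.any_congr_mem
      intro p hp
      have := PySem.Dict.getD_of_mem_items (pvFoldA gs) (by exact hp) hkeysnd []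
      simp [this]
    rw [hitems, pvKeys_foldA]
    have hpt : ∀ c ∈ PySem.Set.ofList (gs.map pvJoinDate),
        (decide (1 < ((pvFoldA gs).getD c []).length)) = (decide (1 < (gs.map pvJoinDate).count c)) := by
      intro c _; rw [pvGetD_foldA]
    rw [PySem.List.any_congr_mem hpt, pvAny_count_eq_card]
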